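-- pv_equiv track=rewrite | github.com/manjari-0910/CP-Problems | 03-recursion_onlyevendigits-Python/recursion_onlyevendigits.py | evenonly
-- ===== SOURCE A (Python) =====
-- def evenonly(l,a,i):
-- 	if i==len(l):
-- 		return a
-- 	else:
-- 		li=list(str(l[i]))
-- 		li=list(map(int,li))
-- 		li2=[]
-- 		for j in li:
-- 			if j%2==0:
-- 				li2.append(j)
-- 		li2=list(map(str,li2))
-- 		li2=''.join(li2)
-- 		if len(li2)==0:
-- 			a.append(0)
-- 		elif int(li2)%2==0:
-- 			a.append(int(li2))
-- 		i+=1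
-- 		return evenonly(l,a,i)
-- ===== SOURCE B (Python) =====
-- def evenonly(l, a, i):
--     for idx in range(i, len(l)):
--         evens = ''.join(c for c in str(l[idx]) if int(c) % 2 == 0)
--         if not evens:
--             a.append(0)
--         else:
--             n = int(evens)
--             if n % 2 == 0:
--                 a.append(n)
--     return a
-- ===== Notes on version B (the rewrite author's own statement) =====
-- stated objective: idiomatic
-- what changed: A's accumulator-passing tail recursion is replaced by an explicit for-loop over range(i, len(l)), and the four-stage digit pipeline (map int, filter loop, map str, join) is collapsed into one join over a generator that filters even digits directly.
import Mathlib
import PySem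

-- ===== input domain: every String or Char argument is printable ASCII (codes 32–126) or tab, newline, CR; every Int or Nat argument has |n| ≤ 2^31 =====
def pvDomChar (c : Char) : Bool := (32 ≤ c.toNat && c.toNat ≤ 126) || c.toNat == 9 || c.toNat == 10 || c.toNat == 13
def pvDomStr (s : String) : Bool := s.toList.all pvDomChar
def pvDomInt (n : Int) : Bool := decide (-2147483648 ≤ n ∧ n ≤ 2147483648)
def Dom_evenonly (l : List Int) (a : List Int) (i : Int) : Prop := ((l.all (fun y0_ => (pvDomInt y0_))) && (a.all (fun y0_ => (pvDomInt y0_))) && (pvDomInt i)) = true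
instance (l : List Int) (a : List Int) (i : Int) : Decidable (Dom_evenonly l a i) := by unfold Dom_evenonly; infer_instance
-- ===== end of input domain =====

-- B replaces A's accumulator-passing tail recursion by the natural explicit loop
-- 'for idx in range(i, len(l))' (same per-element even-digit extraction written as a
-- single filter); both Pythons mutate `a` in place and return it — the theorems are
-- about the common return value.

-- ===== PORT A =====
def evenonly (l : List Int) (a : List Int) (i : Int) : List Int :=
  if i = (l.length : Int) then a
  else
    match hv : PySem.List.pyGet? l i with
    | none => a   -- l[i] raises IndexError in Python here; such inputs are outside Pre_evenonly
    | some v =>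
      -- li = list(map(int, list(str(l[i])))): int(c) on a one-char string is c.toNat - 48,
      -- exact when c is a decimal digit; a non-digit char (the '-' of a negative element)
      -- raises ValueError in Python — those inputs are outside Pre_evenonly
      let li : List Int := (PySem.Int.toStr v).toList.map (fun c => ((c.toNat : Int) - 48))
      let li2 : List Int := li.foldl (fun acc j => if PySem.Int.mod j 2 = 0 then acc ++ [j] else acc) []
      let s : String := PySem.Str.join "" (li2.map PySem.Int.toStr)
      -- int(li2): under Pre_evenonly s is a nonempty digit string, so the parse succeeds
      let a' : List Int :=
        if PySem.Str.len s = 0 then a ++ [0]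
        else if PySem.Int.mod ((PySem.Int.ofStr? s).getD 0) 2 = 0 then a ++ [(PySem.Int.ofStr? s).getD 0]
        else a
      evenonly l a' (i + 1)
termination_by (l.length - i).toNat
decreasing_by
  have h : PySem.Raise.InRange l.length i := by
    by_contra hcon
    have hnone := (PySem.List.pyGet?_eq_none_iff l i).mpr hcon
    rw [hv] at hnone
    simp at hnone
  unfold PySem.Raise.InRange at h
  omega

-- ===== PORT B =====
def evenonly_alt (l : List Int) (a : List Int) (i : Int) : List Int :=
  (PySem.List.pyRange i (l.length : Int)).foldl
    (fun acc idx =>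
      -- l[idx]: every index the loop visits is in range under Pre_evenonly
      let v : Int := PySem.List.pyGetD l idx 0
      -- evens = ''.join(c for c in str(l[idx]) if int(c) % 2 == 0); int(c) = c.toNat - 48, exact for digit chars
      let evens : List Char := (PySem.Int.toStr v).toList.filter
          (fun c => decide (PySem.Int.mod ((c.toNat : Int) - 48) 2 = 0))
      if evens.isEmpty then acc ++ [0]
      else
        -- n = int(evens): under Pre_evenonly evens is a nonempty digit string, the parse succeeds
        let n : Int := (PySem.Int.ofChars? evens).getD 0
        if PySem.Int.mod n 2 = 0 then acc ++ [n] else acc)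
    a

-- ===== PRECONDITION & SPEC =====
-- Pre_evenonly holds exactly when the Python A returns: the start index must satisfy
-- -len(l) ≤ i ≤ len(l) (otherwise l[i] raises IndexError), and every element A visits —
-- l[i:] for i ≥ 0, all of l for negative i (the scan wraps once, then covers the whole
-- list) — must be nonnegative (str of a negative element makes int('-') raise ValueError).
def Pre_evenonly (l : List Int) (a : List Int) (i : Int) : Prop :=
  -(l.length : Int) ≤ i ∧ i ≤ (l.length : Int) ∧ ∀ x ∈ l.drop (max i 0).toNat, 0 ≤ x
instance (l : List Int) (a : List Int) (i : Int) : Decidable (Pre_evenonly l a i) := by unfold Pre_evenonly; infer_instance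

def pvWitness_evenonly : List Int × List Int × Int := ([20, 3, 48], [7], 0)

def Spec_evenonly (l : List Int) (a : List Int) (i : Int) (out : List Int) : Prop := out = evenonly_alt l a i
instance (l : List Int) (a : List Int) (i : Int) (out : List Int) : Decidable (Spec_evenonly l a i out) := by unfold Spec_evenonly; infer_instance

-- ===== CLAIM (what is proved, stated in full; the proofs are below) =====
def Claim_equal_evenonly : Prop := ∀ (l : List Int) (a : List Int) (i : Int), Dom_evenonly l a i → Pre_evenonly l a i → Spec_evenonly l a i (evenonly l a i)

-- ===== LEMMAS AND PROOFS =====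

theorem digitChar_isDigit (m : Nat) (h : m < 10) : (Nat.digitChar m).isDigit = true := by
  interval_cases m <;> decide

theorem toDigitsCore_digits (fuel : Nat) : ∀ (n : Nat) (rest : List Char),
    (∀ c ∈ rest, c.isDigit = true) → ∀ c ∈ Nat.toDigitsCore 10 fuel n rest, c.isDigit = true := by
  induction fuel with
  | zero => intro n rest h; simpa [Nat.toDigitsCore] using h
  | succ f ih =>
    intro n rest h c hc
    rw [Nat.toDigitsCore] at hc
    have hstep : ∀ d ∈ Nat.digitChar (n % 10) :: rest, d.isDigit = true := by
      intro d hd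
      rcases List.mem_cons.mp hd with hd | hd
      · exact hd ▸ digitChar_isDigit _ (Nat.mod_lt _ (by omega))
      · exact h d hd
    by_cases h10 : n / 10 = 0
    · simp only [h10] at hc
      exact hstep c hc
    · simp only [h10] at hc
      exact ih _ _ hstep c hc

theorem toChars_digits (v : Int) (hv : 0 ≤ v) : ∀ c ∈ PySem.Int.toChars v, c.isDigit = true := by
  simp only [PySem.Int.toChars, if_neg (not_lt.mpr hv)]
  exact toDigitsCore_digits _ _ [] (by simp)

theorem toChars_of_digit (c : Char) (h : c.isDigit = true) :
    PySem.Int.toChars ((c.toNat : Int) - 48) = [c] := by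
  have hofNat : c = Char.ofNat c.toNat := by simp [Char.ofNat_toNat]
  have h1 : 48 ≤ c.toNat := by
    simp only [Char.isDigit, Bool.and_eq_true, decide_eq_true_eq] at h
    exact h.1
  have h2 : c.toNat ≤ 57 := by
    simp only [Char.isDigit, Bool.and_eq_true, decide_eq_true_eq] at h
    exact h.2
  generalize hg : c.toNat = n at h1 h2 hofNat ⊢
  interval_cases n <;> (rw [hofNat]; decide)

-- the two per-element bodies produce the same appended value for a nonnegative element
theorem step_eq (v : Int) (hv : 0 ≤ v) (a : List Int) :
    (let li : List Int := (PySem.Int.toStr v).toList.map (fun c => ((c.toNat : Int) - 48));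
     let li2 : List Int := li.foldl (fun acc j => if PySem.Int.mod j 2 = 0 then acc ++ [j] else acc) [];
     let s : String := PySem.Str.join "" (li2.map PySem.Int.toStr);
     if PySem.Str.len s = 0 then a ++ [0]
     else if PySem.Int.mod ((PySem.Int.ofStr? s).getD 0) 2 = 0 then a ++ [(PySem.Int.ofStr? s).getD 0]
     else a)
    =
    (let evens : List Char := (PySem.Int.toStr v).toList.filter
        (fun c => decide (PySem.Int.mod ((c.toNat : Int) - 48) 2 = 0));
     if evens.isEmpty then a ++ [0]
     else
       let n : Int := (PySem.Int.ofChars? evens).getD 0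
       if PySem.Int.mod n 2 = 0 then a ++ [n] else a) := by
  simp only []
  set f : Char → Int := fun c => ((c.toNat : Int) - 48) with hf
  set p : Char → Bool := fun c => decide (PySem.Int.mod ((c.toNat : Int) - 48) 2 = 0) with hp
  set cs : List Char := (PySem.Int.toStr v).toList with hcs
  set evens : List Char := cs.filter p with hevens
  have hdig : ∀ c ∈ cs, c.isDigit = true := by
    rw [hcs, PySem.Int.toList_toStr]; exact toChars_digits v hv
  have h1 : (cs.map f).foldl (fun acc j => if PySem.Int.mod j 2 = 0 then acc ++ [j] else acc)
      ([] : List Int) = evens.map f := by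
    have := PySem.List.foldl_append_if (fun j : Int => decide (PySem.Int.mod j 2 = 0)) id (cs.map f) []
    simp only [decide_eq_true_eq, List.map_id, id_eq] at this
    rw [this, List.nil_append, List.filter_map, hevens]
    rfl
  rw [h1]
  have h2 : (PySem.Str.join "" ((evens.map f).map PySem.Int.toStr)).toList = evens := by
    rw [PySem.Str.toList_join, List.map_map, List.map_map]
    have hmaps : evens.map (fun c => (PySem.Int.toStr (f c)).toList) = evens.map (fun c => [c]) := by
      apply List.map_congr_left
      intro c hc
      rw [PySem.Int.toList_toStr, hf]
      exact toChars_of_digit c (hdig c (List.mem_of_mem_filter hc))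
    show PySem.Chars.join "".toList (evens.map (fun c => (PySem.Int.toStr (f c)).toList)) = evens
    rw [hmaps]
    exact PySem.Chars.join_nil_singletons evens
  have hlen : PySem.Str.len (PySem.Str.join "" ((evens.map f).map PySem.Int.toStr))
      = (evens.length : Int) := by
    rw [PySem.Str.len_eq, h2]
  have hparse : PySem.Int.ofStr? (PySem.Str.join "" ((evens.map f).map PySem.Int.toStr))
      = PySem.Int.ofChars? evens := by
    show PySem.Int.ofChars? (PySem.Str.join "" ((evens.map f).map PySem.Int.toStr)).toList
      = PySem.Int.ofChars? evens
    rw [h2]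
  rw [hlen, hparse]
  by_cases he : evens = []
  · simp [he]
  · have hne : (evens.length : Int) ≠ 0 := by
      simpa using fun h => he (List.length_eq_zero_iff.mp h)
    simp [List.isEmpty_iff, he]

set_option maxHeartbeats 1000000 in
theorem loop_eq (l : List Int) : ∀ (n : Nat) (i : Int) (a : List Int),
    (( l.length : Int) - i).toNat = n → Pre_evenonly l a i →
    evenonly l a i = evenonly_alt l a i := by
  intro n
  induction n with
  | zero =>
    intro i a hn hpre
    have hi : i = (l.length : Int) := by
      rcases hpre with ⟨_, h2, _⟩; omega
    rw [evenonly, if_pos hi]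
    unfold evenonly_alt
    rw [PySem.List.pyRange_one_eq_nil (by omega)]
    rfl
  | succ n ih =>
    intro i a hn hpre
    obtain ⟨hlo, hhi, hnn⟩ := hpre
    have hlt : i < (l.length : Int) := by omega
    rw [evenonly, if_neg (by omega)]
    split
    case _ heq =>
      exact absurd ((PySem.List.pyGet?_eq_none_iff l i).mp heq)
        (by unfold PySem.Raise.InRange; omega)
    case _ v heq =>
      have hv : 0 ≤ v := by
        by_cases hi0 : 0 ≤ i
        · have hgg : l[i.toNat]? = some v := by
            rw [← PySem.List.pyGet?_of_nonneg l hi0]; exact heq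
          apply hnn
          have hmax : (max i 0).toNat = i.toNat := by omega
          rw [hmax]
          have hdg : (l.drop i.toNat)[0]? = some v := by
            rw [List.getElem?_drop]; simpa using hgg
          exact List.mem_of_getElem? hdg
        · have hmem : v ∈ l := PySem.List.mem_of_pyGet?_eq_some l heq
          apply hnn
          have hmax : (max i 0).toNat = 0 := by omega
          rw [hmax]; simpa using hmem
      have hpre' : ∀ a' : List Int, Pre_evenonly l a' (i + 1) := by
        intro a'
        refine ⟨by omega, by omega, ?_⟩
        intro x hx
        apply hnn
        have hdd : l.drop (max (i + 1) 0).toNat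
            = (l.drop (max i 0).toNat).drop ((max (i + 1) 0).toNat - (max i 0).toNat) := by
          rw [List.drop_drop]
          congr 1
          omega
        rw [hdd] at hx
        exact List.drop_subset _ _ hx
      dsimp only
      rw [ih (i + 1) _ (by omega) (hpre' _)]
      unfold evenonly_alt
      rw [PySem.List.pyRange_one_cons hlt, List.foldl_cons]
      refine congrFun (congrArg (List.foldl _) ?_) _
      have hgetD : PySem.List.pyGetD l i 0 = v := by
        show (PySem.List.pyGet? l i).getD 0 = v
        rw [heq]; rfl
      dsimp only
      rw [hgetD]
      exact step_eq v hv a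

-- ===== VERDICT (by name: the statement is the Claim_ definition above) =====
theorem evenonly_spec : Claim_equal_evenonly := by
  intro l a i _ hpre
  unfold Spec_evenonly
  exact loop_eq l _ i a rfl hpre
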